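-- pv_equiv track=rewrite | github.com/drizztSun/common_project | PythonLeetcode/leetcodeM/1024_VideoStitching.py | doit_sort
-- ===== SOURCE A (Python) =====
-- def doit_sort(clips, T):
--     #
--     end, end2, res = -1, 0, 0
--     for i, j in sorted(clips):
--         if end2 >= T or i > end2:
--             break
--         elif end < i <= end2:
--             res, end = res + 1, end2
--         end2 = max(end2, j)
--     return res if end2 >= T else -1
-- ===== SOURCE B (Python) =====
-- def doit_sort(clips, T):
--     # Jump-style greedy, no sorting: repeatedly extend the covered prefix
--     # [0, cur] to the furthest endpoint of any clip that starts inside it,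
--     # counting one clip per extension.
--     cur, res = 0, 0
--     while cur < T:
--         best = cur
--         for i, j in clips:
--             if i <= cur and j > best:
--                 best = j
--         if best == cur:
--             return -1
--         cur, res = best, res + 1
--     return res
-- ===== Notes on version B (the rewrite author's own statement) =====
-- stated objective: alternative
-- what changed: A sorts the clips and runs a one-pass two-frontier greedy over the sorted list; B never sorts and instead repeatedly scans the unsorted clips for the furthest endpoint reachable from the current covered prefix (jump-game greedy), counting one clip per extension.
-- intended difference: On inputs with T > 0 where some clip starts before 0 and its positive reach m matters (m >= T, or some clip with start in [0, m] reaches past m), A absorbs every clip starting before 0 at no cost and returns a count that is one too small (e.g. 0 for clips=[(-1,2)], T=1), while B counts each used clip and returns the true minimum number of clips, which is the intended value. — e.g. on doit_sort([(-1, 2)], 1): A returns 0, B returns 1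
import Mathlib
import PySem

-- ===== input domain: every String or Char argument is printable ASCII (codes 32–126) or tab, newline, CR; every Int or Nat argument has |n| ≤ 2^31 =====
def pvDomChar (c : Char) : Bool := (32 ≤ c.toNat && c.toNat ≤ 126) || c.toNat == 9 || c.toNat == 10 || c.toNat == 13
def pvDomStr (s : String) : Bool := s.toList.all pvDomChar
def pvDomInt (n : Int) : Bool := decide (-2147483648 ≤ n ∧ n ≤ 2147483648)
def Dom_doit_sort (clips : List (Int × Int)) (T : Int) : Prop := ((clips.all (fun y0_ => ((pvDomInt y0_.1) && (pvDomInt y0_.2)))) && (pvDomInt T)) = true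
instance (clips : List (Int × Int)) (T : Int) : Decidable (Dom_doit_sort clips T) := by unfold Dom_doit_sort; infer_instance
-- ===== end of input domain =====

-- B replaces A's sort + one-pass two-frontier greedy by a sort-free jump greedy
-- (repeated scan for the furthest reachable endpoint); they agree outside
-- D_doit_sort, where A absorbs clips starting before 0 at no cost.

-- ===== PORT A =====
-- the for-loop of A over sorted(clips); 'break' returns the state (end2, res)
def doitLoopA (T : Int) : List (Int × Int) → Int → Int → Int → Int × Int
  | [], _e, e2, res => (e2, res)
  | (i, j) :: rest, e, e2, res =>
    if e2 ≥ T ∨ i > e2 then (e2, res)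
    else if e < i ∧ i ≤ e2 then doitLoopA T rest e2 (max e2 j) (res + 1)
    else doitLoopA T rest e (max e2 j) res

def doit_sort (clips : List (Int × Int)) (T : Int) : Int :=
  -- sorted(clips): Python's lexicographic order on pairs
  let s := PySem.List.sorted2 clips Prod.fst Prod.snd
  let q := doitLoopA T s (-1) 0 0
  if q.1 ≥ T then q.2 else -1

-- ===== PORT B =====
-- the inner for-loop of Source B: best = max over clips with i <= cur of j
def bestReach (clips : List (Int × Int)) (cur : Int) : Int :=
  clips.foldl (fun best p => if p.1 ≤ cur ∧ p.2 > best then p.2 else best) cur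

-- termination helper for the while-loop: the scanned best never decreases
theorem bestReach_fold_ge (c : Int) (l : List (Int × Int)) :
    ∀ b : Int, b ≤ List.foldl (fun best p => if p.1 ≤ c ∧ p.2 > best then p.2 else best) b l := by
  induction l with
  | nil => intro b; simp
  | cons p t ih =>
    intro b
    simp only [List.foldl_cons]
    refine le_trans ?_ (ih _)
    split_ifs with h
    · exact le_of_lt h.2
    · exact le_refl b

theorem le_bestReach (clips : List (Int × Int)) (c : Int) : c ≤ bestReach clips c :=
  bestReach_fold_ge c clips c

-- the while-loop of Source B
def doitLoopB (clips : List (Int × Int)) (T : Int) (cur res : Int) : Int :=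
  if cur < T then
    if bestReach clips cur = cur then -1
    else doitLoopB clips T (bestReach clips cur) (res + 1)
  else res
termination_by (T - cur).toNat
decreasing_by
  have h := le_bestReach clips cur
  omega

def doit_sort_alt (clips : List (Int × Int)) (T : Int) : Int :=
  doitLoopB clips T 0 0

-- ===== PRECONDITION & SPEC =====
-- reach of the clips starting before 0, floored at 0
def negReach (clips : List (Int × Int)) : Int :=
  ((clips.filter (fun p => decide (p.1 < 0))).map Prod.snd).foldl max 0

-- On inputs with T > 0 where some clip starts before 0 and its positive reach m
-- matters (m ≥ T, or some clip with start in [0,m] reaches past m), A absorbs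
-- every clip starting before 0 at no cost and returns a count one too small,
-- while B counts each used clip and returns the intended minimum number of clips.
def D_doit_sort (clips : List (Int × Int)) (T : Int) : Prop :=
  0 < T ∧ 0 < negReach clips ∧
    (T ≤ negReach clips ∨
      ∃ p ∈ clips, 0 ≤ p.1 ∧ p.1 ≤ negReach clips ∧ negReach clips < p.2)
instance (clips : List (Int × Int)) (T : Int) : Decidable (D_doit_sort clips T) := by
  unfold D_doit_sort; infer_instance

def Spec_doit_sort (clips : List (Int × Int)) (T : Int) (out : Int) : Prop :=
  ¬ D_doit_sort clips T → out = doit_sort_alt clips T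
instance (clips : List (Int × Int)) (T : Int) (out : Int) : Decidable (Spec_doit_sort clips T out) := by
  unfold Spec_doit_sort; infer_instance

def pvDiffWitness_doit_sort : (List (Int × Int)) × Int := ([(-1, 2)], 1)
def pvDiffWitnessOut_doit_sort : Int × Int := (0, 1)

-- ===== CLAIM (what is proved, stated in full; the proofs are below) =====
def Claim_unchanged_doit_sort : Prop := ∀ (clips : List (Int × Int)) (T : Int), Dom_doit_sort clips T → Spec_doit_sort clips T (doit_sort clips T)
def Claim_changed_doit_sort : Prop := Dom_doit_sort (pvDiffWitness_doit_sort.1) (pvDiffWitness_doit_sort.2) ∧ D_doit_sort (pvDiffWitness_doit_sort.1) (pvDiffWitness_doit_sort.2) ∧ doit_sort (pvDiffWitness_doit_sort.1) (pvDiffWitness_doit_sort.2) = pvDiffWitnessOut_doit_sort.1 ∧ doit_sort_alt (pvDiffWitness_doit_sort.1) (pvDiffWitness_doit_sort.2) = pvDiffWitnessOut_doit_sort.2 ∧ pvDiffWitnessOut_doit_sort.1 ≠ pvDiffWitnessOut_doit_sort.2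

-- ===== LEMMAS AND PROOFS =====

-- 'absorb' fold: extend acc with the ends of the clips of t that start at or before e
def absorbE (e acc : Int) (t : List (Int × Int)) : Int :=
  t.foldl (fun b p => if p.1 ≤ e then max b p.2 else b) acc

theorem acc_le_absorbE (e : Int) (t : List (Int × Int)) :
    ∀ acc : Int, acc ≤ absorbE e acc t := by
  induction t with
  | nil => intro acc; simp [absorbE]
  | cons p t ih =>
    intro acc
    simp only [absorbE, List.foldl_cons]
    refine le_trans ?_ (ih _)
    split_ifs
    · exact le_max_left _ _
    · exact le_refl acc

theorem absorbE_of_forall_gt (e : Int) (t : List (Int × Int)) :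
    ∀ acc : Int, (∀ p ∈ t, e < p.1) → absorbE e acc t = acc := by
  induction t with
  | nil => intro acc _; rfl
  | cons p t ih =>
    intro acc h
    simp only [absorbE, List.foldl_cons]
    rw [if_neg (by have := h p (List.mem_cons_self ..); omega)]
    exact ih acc (fun q hq => h q (List.mem_cons_of_mem _ hq))

theorem absorbE_le (e K : Int) (t : List (Int × Int)) :
    ∀ acc : Int, acc ≤ K → (∀ p ∈ t, p.1 ≤ e → p.2 ≤ K) → absorbE e acc t ≤ K := by
  induction t with
  | nil => intro acc hacc _; exact hacc
  | cons p t ih =>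
    intro acc hacc h
    simp only [absorbE, List.foldl_cons]
    refine ih _ ?_ (fun q hq => h q (List.mem_cons_of_mem _ hq))
    split_ifs with hc
    · exact max_le hacc (h p (List.mem_cons_self ..) hc)
    · exact hacc

theorem snd_le_absorbE (e : Int) (t : List (Int × Int)) (p : Int × Int) (hpe : p.1 ≤ e) :
    ∀ acc : Int, p ∈ t → p.2 ≤ absorbE e acc t := by
  induction t with
  | nil => intro acc h; cases h
  | cons q t ih =>
    intro acc hp
    simp only [absorbE, List.foldl_cons]
    rcases List.mem_cons.mp hp with h | h
    · subst h
      rw [if_pos hpe]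
      exact le_trans (le_max_right _ _) (acc_le_absorbE _ _ _)
    · exact ih _ h

theorem absorbE_perm (e acc : Int) {l₁ l₂ : List (Int × Int)} (h : l₁.Perm l₂) :
    absorbE e acc l₁ = absorbE e acc l₂ := by
  unfold absorbE
  haveI : RightCommutative (fun (b : Int) (p : Int × Int) => if p.1 ≤ e then max b p.2 else b) := by
    constructor
    intro b p q
    by_cases h1 : p.1 ≤ e <;> by_cases h2 : q.1 ≤ e <;> simp [h1, h2]
    rw [max_comm p.2 q.2]
  exact h.foldl_eq acc

theorem bestReach_eq_absorbE (clips : List (Int × Int)) (c : Int) :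
    bestReach clips c = absorbE c c clips := by
  unfold bestReach absorbE
  refine List.foldl_ext _ _ c ?_
  intro b p _
  by_cases h1 : p.1 ≤ c
  · by_cases h2 : p.2 > b
    · rw [if_pos ⟨h1, h2⟩, if_pos h1, max_eq_right (le_of_lt h2)]
    · rw [if_neg (fun h => absurd h.2 h2), if_pos h1, max_eq_left (by omega)]
  · rw [if_neg (fun h => absurd h.1 h1), if_neg h1]

-- sortedness on first components of sorted2 (no such lemma exists for sorted2 in PySem)
theorem insertBy_pairwise_fst (before : (Int × Int) → (Int × Int) → Bool)
    (h1 : ∀ a b, before a b = true → a.1 ≤ b.1)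
    (h2 : ∀ a b, before a b = false → b.1 ≤ a.1)
    (x : Int × Int) (l : List (Int × Int))
    (hl : l.Pairwise (fun a b => a.1 ≤ b.1)) :
    (PySem.List.insertBy before x l).Pairwise (fun a b => a.1 ≤ b.1) := by
  induction l with
  | nil => simp [PySem.List.insertBy]
  | cons y ys ih =>
    rcases List.pairwise_cons.mp hl with ⟨hy, hys⟩
    by_cases hb : before x y = true
    · simp only [PySem.List.insertBy, hb, if_true]
      refine List.pairwise_cons.mpr ⟨?_, hl⟩
      intro z hz
      rcases List.mem_cons.mp hz with h | h
      · subst h; exact h1 _ _ hb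
      · exact le_trans (h1 _ _ hb) (hy z h)
    · simp only [PySem.List.insertBy, hb]
      refine List.pairwise_cons.mpr ⟨?_, ih hys⟩
      intro z hz
      rcases (PySem.List.mem_insertBy before x z ys).mp hz with h | h
      · subst h; exact h2 _ _ (by simpa using hb)
      · exact hy z h

theorem foldl_insertBy_pairwise (before : (Int × Int) → (Int × Int) → Bool)
    (h1 : ∀ a b, before a b = true → a.1 ≤ b.1)
    (h2 : ∀ a b, before a b = false → b.1 ≤ a.1) :
    ∀ (l acc : List (Int × Int)), acc.Pairwise (fun a b => a.1 ≤ b.1) →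
      (l.foldl (fun acc x => PySem.List.insertBy before x acc) acc).Pairwise (fun a b => a.1 ≤ b.1) := by
  intro l
  induction l with
  | nil => intro acc h; exact h
  | cons x l ih =>
    intro acc h
    exact ih _ (insertBy_pairwise_fst before h1 h2 x acc h)

theorem sorted2_pairwise_fst (clips : List (Int × Int)) :
    (PySem.List.sorted2 clips Prod.fst Prod.snd).Pairwise (fun a b => a.1 ≤ b.1) := by
  rw [show PySem.List.sorted2 clips Prod.fst Prod.snd =
      clips.foldl (fun acc x => PySem.List.insertBy
        (fun a b : Int × Int => decide (a.1 < b.1) || (!decide (b.1 < a.1) && decide (a.2 < b.2)))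
        x acc) [] from rfl]
  refine foldl_insertBy_pairwise _ ?_ ?_ clips [] List.Pairwise.nil
  · intro a b h
    simp at h
    omega
  · intro a b h
    simp at h
    omega

-- the core simulation: A's loop on a sorted suffix equals B's jump loop
theorem mainA (clips : List (Int × Int)) (T : Int) :
    ∀ (t : List (Int × Int)) (e e2 r : Int),
      t.Pairwise (fun a b => a.1 ≤ b.1) → e ≤ e2 →
      (∀ c, e2 ≤ c → bestReach clips c = absorbE c c t) →
      (if (doitLoopA T t e e2 r).1 ≥ T then (doitLoopA T t e e2 r).2 else -1)
        = doitLoopB clips T (absorbE e e2 t) r := by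
  intro t
  induction t with
  | nil =>
    intro e e2 r _ _ h3
    simp only [doitLoopA]
    rw [show absorbE e e2 [] = e2 from rfl]
    have hb : bestReach clips e2 = e2 := by rw [h3 e2 le_rfl]; rfl
    rw [doitLoopB]
    by_cases hT : e2 ≥ T
    · rw [if_pos hT, if_neg (by omega)]
    · rw [if_neg hT, if_pos (by omega), if_pos hb]
  | cons hd t ih =>
    obtain ⟨i, j⟩ := hd
    intro e e2 r hpw h2 h3
    rcases List.pairwise_cons.mp hpw with ⟨hhd, hpw'⟩
    by_cases hbrk : e2 ≥ T ∨ i > e2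
    · -- A breaks here
      simp only [doitLoopA, if_pos hbrk]
      by_cases hT : e2 ≥ T
      · rw [if_pos hT]
        have hle := acc_le_absorbE e ((i, j) :: t) e2
        rw [doitLoopB, if_neg (by omega)]
      · have hi : i > e2 := by tauto
        rw [if_neg hT]
        have hgt : ∀ p ∈ (i, j) :: t, e2 < p.1 := by
          intro p hp
          rcases List.mem_cons.mp hp with h | h
          · subst h; exact hi
          · have := hhd p h; simp only at this; omega
        have habs : absorbE e e2 ((i, j) :: t) = e2 :=
          absorbE_of_forall_gt e _ e2 (fun p hp => by have := hgt p hp; omega)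
        rw [habs, doitLoopB, if_pos (by omega)]
        have hb : bestReach clips e2 = e2 := by
          rw [h3 e2 le_rfl]
          exact absorbE_of_forall_gt e2 _ e2 hgt
        rw [if_pos hb]
    · push Not at hbrk
      obtain ⟨hT, hi⟩ := hbrk
      simp only [doitLoopA, if_neg (show ¬(e2 ≥ T ∨ i > e2) by omega)]
      have h3' : ∀ c, max e2 j ≤ c → bestReach clips c = absorbE c c t := by
        intro c hc
        rw [h3 c (le_trans (le_max_left _ _) hc)]
        show absorbE c c ((i, j) :: t) = _
        simp only [absorbE, List.foldl_cons]
        rw [if_pos (show (i, j).1 ≤ c by simp only; omega)]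
        have : max c (i, j).2 = c := max_eq_left (by simp only; omega)
        rw [this]
      by_cases hlvl : e < i ∧ i ≤ e2
      · rw [if_pos hlvl]
        rw [ih e2 (max e2 j) (r + 1) hpw' (le_max_left _ _) h3']
        have habs : absorbE e e2 ((i, j) :: t) = e2 := by
          refine absorbE_of_forall_gt e _ e2 ?_
          intro p hp
          rcases List.mem_cons.mp hp with h | h
          · subst h; exact hlvl.1
          · have := hhd p h; simp only at this; omega
        rw [habs]
        have hbR : bestReach clips e2 = absorbE e2 (max e2 j) t := by
          rw [h3 e2 le_rfl]
          show absorbE e2 e2 ((i, j) :: t) = _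
          simp only [absorbE, List.foldl_cons]
          rw [if_pos (show (i, j).1 ≤ e2 from hi)]
        conv_rhs => rw [doitLoopB, if_pos (show e2 < T by omega)]
        by_cases hXe : bestReach clips e2 = e2
        · rw [if_pos hXe]
          have hX : absorbE e2 (max e2 j) t = e2 := by rw [← hbR, hXe]
          rw [hX, doitLoopB, if_pos (by omega), if_pos hXe]
        · rw [if_neg hXe, hbR]
      · rw [if_neg hlvl]
        have hie : i ≤ e := by
          rcases not_and_or.mp hlvl with h | h
          · omega
          · exact absurd hi h
        rw [ih e (max e2 j) r hpw' (le_trans h2 (le_max_left _ _)) h3']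
        have habs : absorbE e e2 ((i, j) :: t) = absorbE e (max e2 j) t := by
          simp only [absorbE, List.foldl_cons]
          rw [if_pos (show (i, j).1 ≤ e from hie)]
        rw [habs]

-- bounds for foldl max (specific shapes used below)
theorem foldl_max_le (K : Int) : ∀ (l : List Int) (b : Int),
    b ≤ K → (∀ x ∈ l, x ≤ K) → l.foldl max b ≤ K := by
  intro l
  induction l with
  | nil => intro b hb _; exact hb
  | cons x l ih =>
    intro b hb h
    simp only [List.foldl_cons]
    exact ih _ (max_le hb (h x (List.mem_cons_self ..))) (fun y hy => h y (List.mem_cons_of_mem _ hy))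

-- negReach is the same fold as absorbE at threshold -1
theorem absorbE_neg_one (l : List (Int × Int)) : ∀ acc : Int,
    absorbE (-1) acc l = ((l.filter (fun p => decide (p.1 < 0))).map Prod.snd).foldl max acc := by
  induction l with
  | nil => intro acc; rfl
  | cons p t ih =>
    intro acc
    by_cases h : p.1 < 0
    · rw [show absorbE (-1) acc (p :: t) = absorbE (-1) (max acc p.2) t from by
        simp only [absorbE, List.foldl_cons]; rw [if_pos (by omega)]]
      rw [List.filter_cons_of_pos (by simpa using h), List.map_cons, List.foldl_cons, ih]
    · rw [show absorbE (-1) acc (p :: t) = absorbE (-1) acc t from by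
        simp only [absorbE, List.foldl_cons]; rw [if_neg (by omega)]]
      rw [List.filter_cons_of_neg (by simpa using h), ih]

theorem negReach_nonneg (clips : List (Int × Int)) : 0 ≤ negReach clips :=
  (PySem.List.le_foldl_max _ 0).1

theorem snd_le_negReach (clips : List (Int × Int)) (p : Int × Int)
    (hp : p ∈ clips) (hneg : p.1 < 0) : p.2 ≤ negReach clips := by
  exact (PySem.List.le_foldl_max _ 0).2 p.2
    (List.mem_map.mpr ⟨p, List.mem_filter.mpr ⟨hp, by simpa using hneg⟩, rfl⟩)

-- outside D_, starting B at A's free reach changes nothing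
theorem finishB (clips : List (Int × Int)) (T : Int) (hD : ¬ D_doit_sort clips T) :
    doitLoopB clips T (negReach clips) 0 = doitLoopB clips T 0 0 := by
  rcases eq_or_lt_of_le (negReach_nonneg clips) with h0 | h0
  · rw [← h0]
  · unfold D_doit_sort at hD
    push Not at hD
    by_cases hT : 0 < T
    · obtain ⟨hTm, hcross⟩ := hD hT h0
      have hbound : ∀ p ∈ clips, p.1 ≤ negReach clips → p.2 ≤ negReach clips := by
        intro p hp hpe
        by_cases h : p.1 < 0
        · exact snd_le_negReach clips p hp h
        · exact hcross p hp (by omega) hpe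
      have hbm : bestReach clips (negReach clips) = negReach clips := by
        rw [bestReach_eq_absorbE]
        exact le_antisymm (absorbE_le _ _ clips _ le_rfl hbound) (acc_le_absorbE _ _ _)
      have hb0 : bestReach clips 0 = negReach clips := by
        rw [bestReach_eq_absorbE]
        refine le_antisymm ?_ ?_
        · exact absorbE_le 0 (negReach clips) clips 0 (le_of_lt h0)
            (fun p hp hpe => hbound p hp (le_trans hpe (negReach_nonneg clips)))
        · refine foldl_max_le _ _ _ (acc_le_absorbE _ _ _) ?_
          intro x hx
          rcases List.mem_map.mp hx with ⟨p, hpf, rfl⟩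
          rcases List.mem_filter.mp hpf with ⟨hp, hpneg⟩
          exact snd_le_absorbE 0 clips p (by simp at hpneg; omega) 0 hp
      have hstop : ∀ res : Int, doitLoopB clips T (negReach clips) res = -1 := by
        intro res
        rw [doitLoopB, if_pos (by omega), if_pos hbm]
      rw [show doitLoopB clips T 0 0 = doitLoopB clips T (negReach clips) 1 from by
        rw [doitLoopB, if_pos hT, hb0, if_neg (by omega)]; norm_num]
      rw [hstop, hstop]
    · rw [doitLoopB, if_neg (by have := negReach_nonneg clips; omega),
        doitLoopB, if_neg (by omega)]

-- ===== VERDICT (by name: the statement is the Claim_ definition above) =====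
theorem doit_sort_spec : Claim_unchanged_doit_sort := by
  intro clips T _hDom
  unfold Spec_doit_sort
  intro hD
  have hperm : (PySem.List.sorted2 clips Prod.fst Prod.snd).Perm clips :=
    PySem.List.sorted2_perm clips Prod.fst Prod.snd false
  have main := mainA clips T (PySem.List.sorted2 clips Prod.fst Prod.snd) (-1) 0 0
    (sorted2_pairwise_fst clips) (by omega)
    (fun c _ => by rw [bestReach_eq_absorbE]; exact absorbE_perm c c hperm.symm)
  refine Eq.trans main ?_
  have habs : absorbE (-1) 0 (PySem.List.sorted2 clips Prod.fst Prod.snd) = negReach clips := by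
    rw [absorbE_perm (-1) 0 hperm, absorbE_neg_one]
    rfl
  rw [habs]
  exact finishB clips T hD

theorem doit_sort_changed : Claim_changed_doit_sort := by
  unfold Claim_changed_doit_sort
  refine ⟨by decide, by decide, by decide, ?_, by decide⟩
  show doitLoopB [(-1, 2)] 1 0 0 = 1
  rw [doitLoopB]
  norm_num [bestReach]
  rw [doitLoopB]
  norm_num
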